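-- pv_equiv track=rewrite | github.com/daniel-reich/turbo-robot | vuSXW3iEnEQNZXjAP_17.py | create_square
-- ===== SOURCE A (Python) =====
-- def create_square(length):
--   if length == None or length <= 0:
--     return ""
--   elif length == 1:
--     return "#"
--   elif length == 2:
--     return "##\n##"
--   else:
--     return "\n".join(["#"*length, "\n".join(["#" + " "*(length-2) + "#"  for i in range(length - 2)]), "#"*length])
-- ===== SOURCE B (Python) =====
-- def create_square(length):
--     if length is None or length <= 0:
--         return ""
--     rows = []
--     for i in range(length):
--         if i == 0 or i == length - 1:
--             rows.append("#" * length)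
--         else:
--             rows.append("#" + " " * (length - 2) + "#")
--     return "\n".join(rows)
-- ===== Notes on version B (the rewrite author's own statement) =====
-- stated objective: simpler
-- what changed: Replaces A's three hardcoded small cases plus a piecewise three-segment join with one uniform loop over the rows (border row at i=0 and i=length-1, interior row otherwise) joined once; the unified loop reproduces the length-1 and length-2 cases.
import Mathlib
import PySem

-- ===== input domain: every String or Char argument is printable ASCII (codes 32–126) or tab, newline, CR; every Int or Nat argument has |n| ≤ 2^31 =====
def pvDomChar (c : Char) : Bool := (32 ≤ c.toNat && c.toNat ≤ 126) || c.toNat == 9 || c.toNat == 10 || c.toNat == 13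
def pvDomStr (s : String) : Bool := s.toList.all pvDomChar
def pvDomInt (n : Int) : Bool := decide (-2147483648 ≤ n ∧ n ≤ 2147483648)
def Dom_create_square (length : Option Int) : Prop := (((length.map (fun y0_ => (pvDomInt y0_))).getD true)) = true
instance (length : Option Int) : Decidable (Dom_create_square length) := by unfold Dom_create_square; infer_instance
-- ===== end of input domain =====

-- B replaces A's three hardcoded small cases and piecewise three-segment join with one
-- uniform loop over row indices (border row at the two ends, interior row otherwise); simpler.


-- ===== PORT A =====
def create_square (length : Option Int) : String :=
  match length with
  | none => ""
  | some n =>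
    if n ≤ 0 then ""
    else if n = 1 then "#"
    else if n = 2 then "##\n##"
    else
      PySem.Str.join "\n"
        [String.ofList (List.replicate n.toNat '#'),
         PySem.Str.join "\n"
           ((PySem.List.pyRange 0 (n - 2) 1).map
             (fun _ => "#" ++ String.ofList (List.replicate (n - 2).toNat ' ') ++ "#")),
         String.ofList (List.replicate n.toNat '#')]

-- ===== PORT B =====
def create_square_alt (length : Option Int) : String :=
  match length with
  | none => ""
  | some n =>
    if n ≤ 0 then ""
    else
      PySem.Str.join "\n"
        ((PySem.List.pyRange 0 n 1).foldl
          (fun rows i =>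
            rows ++ [if i == 0 || i == n - 1
                     then String.ofList (List.replicate n.toNat '#')
                     else "#" ++ String.ofList (List.replicate (n - 2).toNat ' ') ++ "#"])
          [])

-- ===== PRECONDITION & SPEC =====
def Spec_create_square (length : Option Int) (out : String) : Prop := out = create_square_alt length
instance (length : Option Int) (out : String) : Decidable (Spec_create_square length out) := by unfold Spec_create_square; infer_instance

-- ===== CLAIM (what is proved, stated in full; the proofs are below) =====
def Claim_equal_create_square : Prop := ∀ (length : Option Int), Dom_create_square length → Spec_create_square length (create_square length)

-- ===== LEMMAS AND PROOFS =====

theorem join_cons_of_ne_nil (sep a : List Char) (l : List (List Char)) (h : l ≠ []) :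
    PySem.Chars.join sep (a :: l) = a ++ sep ++ PySem.Chars.join sep l := by
  cases l with
  | nil => exact absurd rfl h
  | cons b t => exact PySem.Chars.join_cons_cons sep a b t

theorem join_append_singleton (sep b : List Char) (a : List Char) (l : List (List Char)) :
    PySem.Chars.join sep (a :: l ++ [b]) = PySem.Chars.join sep (a :: l) ++ sep ++ b := by
  induction l generalizing a with
  | nil => simp [PySem.Chars.join_cons_cons, PySem.Chars.join_singleton]
  | cons c t ih =>
    simp only [List.cons_append] at ih ⊢
    rw [PySem.Chars.join_cons_cons, ih c, PySem.Chars.join_cons_cons]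
    simp [List.append_assoc]

theorem join_three (sep a a' : List Char) (l : List (List Char)) (h : l ≠ []) :
    PySem.Chars.join sep [a, PySem.Chars.join sep l, a'] = PySem.Chars.join sep (a :: (l ++ [a'])) := by
  have h2 := join_append_singleton sep a' a l
  simp only [List.cons_append] at h2
  rw [h2, join_cons_of_ne_nil sep a l h,
    PySem.Chars.join_cons_cons, PySem.Chars.join_cons_cons, PySem.Chars.join_singleton]
  simp [List.append_assoc]

theorem str_join_three (sep a a' : String) (l : List String) (h : l ≠ []) :
    PySem.Str.join sep [a, PySem.Str.join sep l, a'] = PySem.Str.join sep (a :: (l ++ [a'])) := by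
  apply String.toList_inj.mp
  simp only [PySem.Str.toList_join, List.map_append, List.map_cons, List.map_nil]
  exact join_three sep.toList a.toList a'.toList (l.map String.toList) (by simp [h])

theorem foldl_append_map {α β : Type} (g : α → β) (l : List α) : ∀ (init : List β),
    l.foldl (fun rows i => rows ++ [g i]) init = init ++ l.map g := by
  induction l with
  | nil => simp
  | cons x t ih => intro init; simp [List.foldl_cons, ih]

-- ===== VERDICT (by name: the statement is the Claim_ definition above) =====
theorem create_square_spec : Claim_equal_create_square := by
  intro length hdom
  unfold Spec_create_square create_square create_square_alt
  match length with
  | none => rfl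
  | some n =>
    simp only
    by_cases h0 : n ≤ 0
    · simp [h0]
    · simp only [if_neg h0]
      by_cases h1 : n = 1
      · subst h1; decide
      · by_cases h2 : n = 2
        · subst h2; decide
        · simp only [if_neg h1, if_neg h2]
          rw [foldl_append_map]
          have hsplit : PySem.List.pyRange 0 n 1 = [0] ++ PySem.List.pyRange 1 (n - 1) 1 ++ [n - 1] := by
            rw [PySem.List.pyRange_one_append 0 1 n (by omega) (by omega),
              PySem.List.pyRange_one_append 1 (n - 1) n (by omega) (by omega),
              PySem.List.pyRange_one_cons (show (0:Int) < 1 by omega),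
              PySem.List.pyRange_one_eq_nil (show (1:Int) ≤ 0 + 1 by omega),
              PySem.List.pyRange_one_cons (show n - 1 < n by omega),
              PySem.List.pyRange_one_eq_nil (show n ≤ n - 1 + 1 by omega)]
            simp
          rw [hsplit]
          simp only [List.map_append, List.map_cons, List.map_nil, List.nil_append]
          have hmid : ∀ i ∈ PySem.List.pyRange 1 (n - 1) 1,
              (if i == 0 || i == n - 1 then String.ofList (List.replicate n.toNat '#')
               else "#" ++ String.ofList (List.replicate (n - 2).toNat ' ') ++ "#")
              = "#" ++ String.ofList (List.replicate (n - 2).toNat ' ') ++ "#" := by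
            intro i hi
            rw [PySem.List.mem_pyRange_one] at hi
            have e1 : ¬ i = 0 := by omega
            have e2 : ¬ i = n - 1 := by omega
            simp [e1, e2]
          rw [List.map_congr_left hmid]
          simp only [List.map_const', PySem.List.length_pyRange_one]
          have hk : (n - 2 - 0).toNat = (n - 1 - 1).toNat := by omega
          rw [hk]
          have hif0 : (((0:Int) == 0 || (0:Int) == n - 1) = true) := by simp
          have hifn : ((n - 1 == 0 || n - 1 == n - 1) = true) := by simp
          simp only [hif0, hifn, if_true, List.cons_append, List.nil_append]
          rw [str_join_three _ _ _ _ (by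
            simp only [ne_eq, List.replicate_eq_nil_iff]
            omega)]
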